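-- pv_equiv track=rewrite | github.com/michaelayoade/dotmac_erp | scripts/fix_inline_pagination.py | build_pagination_call
-- ===== SOURCE A (Python) =====
-- def build_pagination_call(
--     indent: str,
--     total_var: str,
--     limit: int,
--     filters: dict[str, str],
--     search: bool,
-- ) -> str:
--     """Build the {{ pagination(...) }} macro call."""
--     lines: list[str] = []
--     lines.append(f"{indent}{{{{ pagination(")
--     lines.append(f"{indent}    page=page | default(1),")
--     lines.append(f"{indent}    total_pages=total_pages | default(1),")
--     lines.append(f"{indent}    total_count={total_var} | default(0),")
--
--     # Non-standard limits (not 25 or 50) disable the size selector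
--     if limit not in (25, 50):
--         lines.append(f"{indent}    limit={limit},")
--         lines.append(f"{indent}    show_size_selector=false,")
--     else:
--         lines.append(f"{indent}    limit=limit | default({limit}),")
--
--     if search:
--         lines.append(f"{indent}    search=search | default(''),")
--
--     if filters:
--         filter_entries = ", ".join(f'"{k}": {v}' for k, v in sorted(filters.items()))
--         lines.append(f"{indent}    filters={{{{{filter_entries}}}}}")
--     else:
--         # Remove trailing comma from last line
--         lines[-1] = lines[-1].rstrip(",")
--
--     lines.append(f"{indent}) }}}}")
--     return "\n".join(lines)
-- ===== SOURCE B (Python) =====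
-- def build_pagination_call(
--     indent: str,
--     total_var: str,
--     limit: int,
--     filters: dict[str, str],
--     search: bool,
-- ) -> str:
--     """Build the {{ pagination(...) }} macro call."""
--     std = limit in (25, 50)
--     entries = ", ".join(f'"{k}": {v}' for k, v in sorted(filters.items()))
--     rows = [
--         (True, "page=page | default(1)"),
--         (True, "total_pages=total_pages | default(1)"),
--         (True, f"total_count={total_var} | default(0)"),
--         (std, f"limit=limit | default({limit})"),
--         (not std, f"limit={limit}"),
--         (not std, "show_size_selector=false"),
--         (search, "search=search | default('')"),
--         (bool(filters), "filters={{" + entries + "}}"),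
--     ]
--     body = ",\n".join(f"{indent}    {text}" for cond, text in rows if cond)
--     return f"{indent}{{{{ pagination(\n{body}\n{indent}) }}}}"
-- ===== Notes on version B (the rewrite author's own statement) =====
-- stated objective: simpler
-- what changed: B replaces A's imperative branch-by-branch line appending with its rstrip(',') trailing-comma fixup by a declarative (condition, text) table built in one expression, filtered once, and joined with ',\n' between a fixed header and footer.
import Mathlib
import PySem

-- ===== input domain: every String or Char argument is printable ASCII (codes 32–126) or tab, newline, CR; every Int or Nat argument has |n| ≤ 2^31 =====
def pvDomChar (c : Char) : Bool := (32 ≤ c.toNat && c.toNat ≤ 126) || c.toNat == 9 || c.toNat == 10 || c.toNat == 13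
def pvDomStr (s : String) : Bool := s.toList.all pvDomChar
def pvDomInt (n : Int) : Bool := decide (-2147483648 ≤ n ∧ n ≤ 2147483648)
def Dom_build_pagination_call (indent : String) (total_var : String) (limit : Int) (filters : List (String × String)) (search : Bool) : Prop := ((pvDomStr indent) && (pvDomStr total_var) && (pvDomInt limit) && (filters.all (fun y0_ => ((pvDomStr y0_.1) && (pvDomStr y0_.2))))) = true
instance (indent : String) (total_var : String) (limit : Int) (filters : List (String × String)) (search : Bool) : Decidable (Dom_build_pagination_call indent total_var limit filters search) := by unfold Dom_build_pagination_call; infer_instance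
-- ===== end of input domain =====

-- B is a declarative condition/text table filtered once and joined with ",\n" between a fixed header and footer, replacing A's imperative branch-appends and rstrip(",") fixup; objective: simpler.


-- ===== PORT A =====
def pyRstripComma (s : String) : String :=
  String.ofList ((s.toList.reverse.dropWhile (· == ',')).reverse)

-- literal port of A; pyRstripComma is an exact hand port of str.rstrip(",")
def build_pagination_call (indent : String) (total_var : String) (limit : Int) (filters : List (String × String)) (search : Bool) : String :=
  let d := PySem.Dict.ofList filters
  let lines : List String :=
    [indent ++ "{{ pagination(",
     indent ++ "    page=page | default(1),",
     indent ++ "    total_pages=total_pages | default(1),",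
     indent ++ "    total_count=" ++ total_var ++ " | default(0),"]
  let lines :=
    if limit ≠ 25 ∧ limit ≠ 50 then
      lines ++ [indent ++ "    limit=" ++ PySem.Int.toStr limit ++ ",",
                indent ++ "    show_size_selector=false,"]
    else
      lines ++ [indent ++ "    limit=limit | default(" ++ PySem.Int.toStr limit ++ "),"]
  let lines := if search then lines ++ [indent ++ "    search=search | default('')," ] else lines
  let lines :=
    if d.items ≠ [] then
      let filter_entries := PySem.Str.join ", "
        ((PySem.List.sorted2 d.items (fun kv => kv.1) (fun kv => kv.2)).map
          (fun kv => "\"" ++ kv.1 ++ "\": " ++ kv.2))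
      lines ++ [indent ++ "    filters={{" ++ filter_entries ++ "}}"]
    else
      lines.dropLast ++ [pyRstripComma (lines.getLastD "")]
  let lines := lines ++ [indent ++ ") }}"]
  PySem.Str.join "\n" lines

-- ===== PORT B =====
def build_pagination_call_alt (indent : String) (total_var : String) (limit : Int) (filters : List (String × String)) (search : Bool) : String :=
  let d := PySem.Dict.ofList filters
  let std : Bool := decide (limit = 25 ∨ limit = 50)
  let entries := PySem.Str.join ", "
    ((PySem.List.sorted2 d.items (fun kv => kv.1) (fun kv => kv.2)).map
      (fun kv => "\"" ++ kv.1 ++ "\": " ++ kv.2))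
  let rows : List (Bool × String) :=
    [(true, "page=page | default(1)"),
     (true, "total_pages=total_pages | default(1)"),
     (true, "total_count=" ++ total_var ++ " | default(0)"),
     (std, "limit=limit | default(" ++ PySem.Int.toStr limit ++ ")"),
     (!std, "limit=" ++ PySem.Int.toStr limit),
     (!std, "show_size_selector=false"),
     (search, "search=search | default('')"),
     (d.items ≠ [], "filters={{" ++ entries ++ "}}")]
  let body := PySem.Str.join ",\n"
    ((rows.filter (fun r => r.1)).map (fun r => indent ++ "    " ++ r.2))
  indent ++ "{{ pagination(\n" ++ body ++ "\n" ++ indent ++ ") }}"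

-- ===== PRECONDITION & SPEC =====
def Spec_build_pagination_call (indent : String) (total_var : String) (limit : Int) (filters : List (String × String)) (search : Bool) (out : String) : Prop := out = build_pagination_call_alt indent total_var limit filters search
instance (indent : String) (total_var : String) (limit : Int) (filters : List (String × String)) (search : Bool) (out : String) : Decidable (Spec_build_pagination_call indent total_var limit filters search out) := by unfold Spec_build_pagination_call; infer_instance

-- ===== CLAIM (what is proved, stated in full; the proofs are below) =====
def Claim_equal_build_pagination_call : Prop := ∀ (indent : String) (total_var : String) (limit : Int) (filters : List (String × String)) (search : Bool), Dom_build_pagination_call indent total_var limit filters search → Spec_build_pagination_call indent total_var limit filters search (build_pagination_call indent total_var limit filters search)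

-- ===== LEMMAS AND PROOFS =====

-- ===== VERDICT (by name: the statement is the Claim_ definition above) =====
set_option maxRecDepth 4000 in
theorem build_pagination_call_spec : Claim_equal_build_pagination_call := by
  intro indent total_var limit filters search _
  unfold Spec_build_pagination_call build_pagination_call build_pagination_call_alt
  have e25 : PySem.Int.toStr 25 = "25" := rfl
  have e50 : PySem.Int.toStr 50 = "50" := rfl
  apply String.toList_injective
  by_cases hd : (PySem.Dict.ofList filters).items = [] <;>
    by_cases h25 : limit = 25 <;> by_cases h50 : limit = 50 <;>
      cases search <;>
        simp [hd, h25, h50, e25, e50, pyRstripComma, List.filter, PySem.Str.toList_join,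
              PySem.Chars.join, List.intercalate, List.intersperse, List.dropWhile,
              String.toList_append]
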